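-- pv_equiv track=rewrite | github.com/MolesKamina/TFG | insert_sensor.py | split_days_into_lists
-- ===== SOURCE A (Python) =====
-- def split_days_into_lists(total_days):
--     num_lists = 4
--     days_per_list = total_days // num_lists
--     remainder = total_days % num_lists
--
--     day_lists = []
--     start_day = 0
--
--     for i in range(num_lists):
--         end_day = start_day + days_per_list
--         if remainder > 0:
--             end_day += 1
--             remainder -= 1
--
--         day_lists.append(list(range(start_day, end_day)))
--         start_day = end_day
--
--     return day_lists
-- ===== SOURCE B (Python) =====
-- def split_days_into_lists(total_days):
--     q, r = divmod(total_days, 4)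
--     return [list(range(i * q + min(i, r), (i + 1) * q + min(i + 1, r)))
--             for i in range(4)]
-- ===== Notes on version B (the rewrite author's own statement) =====
-- stated objective: alternative
-- what changed: B computes each segment's start/end boundaries with a closed form (i*q + min(i, r)) in a stateless comprehension instead of A's loop carrying start_day and a decremented remainder as accumulators.
import Mathlib
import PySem

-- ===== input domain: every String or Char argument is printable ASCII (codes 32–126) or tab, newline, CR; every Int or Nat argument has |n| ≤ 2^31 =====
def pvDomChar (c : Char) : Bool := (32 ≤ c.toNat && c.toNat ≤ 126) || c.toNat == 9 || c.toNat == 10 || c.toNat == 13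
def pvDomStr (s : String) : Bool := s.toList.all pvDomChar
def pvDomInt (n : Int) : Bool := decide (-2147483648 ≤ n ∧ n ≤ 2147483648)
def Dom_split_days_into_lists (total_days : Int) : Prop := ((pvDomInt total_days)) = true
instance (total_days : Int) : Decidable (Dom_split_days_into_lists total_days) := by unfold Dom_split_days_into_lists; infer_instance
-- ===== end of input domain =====

-- B computes each quarter's boundaries with a closed form (i*q + min(i,r)) instead of carrying start_day/remainder forward as loop state; objective: alternative decomposition.

-- ===== PORT A =====
def split_days_into_lists (total_days : Int) : List (List Int) :=
  let days_per_list := PySem.Int.floordiv total_days 4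
  let remainder0 := PySem.Int.mod total_days 4
  let st := (PySem.List.pyRange 0 4 1).foldl
    (fun (st : List (List Int) × Int × Int) (_ : Int) =>
      let day_lists := st.1
      let start_day := st.2.1
      let remainder := st.2.2
      let end_day := start_day + days_per_list
      let p := if remainder > 0 then (end_day + 1, remainder - 1) else (end_day, remainder)
      (day_lists ++ [PySem.List.pyRange start_day p.1 1], p.1, p.2))
    ([], 0, remainder0)
  st.1

-- ===== PORT B =====
def split_days_into_lists_alt (total_days : Int) : List (List Int) :=
  let q := PySem.Int.floordiv total_days 4
  let r := PySem.Int.mod total_days 4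
  (PySem.List.pyRange 0 4 1).map
    (fun i => PySem.List.pyRange (i * q + min i r) ((i + 1) * q + min (i + 1) r) 1)

-- ===== PRECONDITION & SPEC =====
def Spec_split_days_into_lists (total_days : Int) (out : List (List Int)) : Prop := out = split_days_into_lists_alt total_days
instance (total_days : Int) (out : List (List Int)) : Decidable (Spec_split_days_into_lists total_days out) := by unfold Spec_split_days_into_lists; infer_instance

-- ===== CLAIM (what is proved, stated in full; the proofs are below) =====
def Claim_equal_split_days_into_lists : Prop := ∀ (total_days : Int), Dom_split_days_into_lists total_days → Spec_split_days_into_lists total_days (split_days_into_lists total_days)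

-- ===== LEMMAS AND PROOFS =====

-- ===== VERDICT (by name: the statement is the Claim_ definition above) =====
theorem split_days_into_lists_spec : Claim_equal_split_days_into_lists := by
  intro n _
  unfold Spec_split_days_into_lists split_days_into_lists split_days_into_lists_alt
  have h0 : 0 ≤ PySem.Int.mod n 4 := PySem.Int.mod_nonneg n (by norm_num)
  have h4 : PySem.Int.mod n 4 < 4 := PySem.Int.mod_lt n (by norm_num)
  set q := PySem.Int.floordiv n 4 with hq
  set r := PySem.Int.mod n 4 with hr
  have hrange : PySem.List.pyRange 0 4 1 = [0, 1, 2, 3] := by decide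
  interval_cases r <;>
    simp only [hrange, List.foldl, List.map] <;>
    norm_num <;>
    (constructor <;> (try constructor)) <;>
    congr 1 <;> ring
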